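-- pv_equiv track=rewrite | github.com/RudraPratapDev/RaftVault | crypto/server.py | feat_longest_run
-- ===== SOURCE A (Python) =====
-- def feat_longest_run(bits):
--     max_0, max_1, cur_0, cur_1 = 0, 0, 0, 0
--     for b in bits:
--         if b == 0:
--             cur_0 += 1; cur_1 = 0
--         else:
--             cur_1 += 1; cur_0 = 0
--         max_0 = max(max_0, cur_0)
--         max_1 = max(max_1, cur_1)
--     return max_0, max_1
-- ===== SOURCE B (Python) =====
-- def feat_longest_run(bits):
--     max_0 = max_1 = 0
--     i, n = 0, len(bits)
--     while i < n:
--         zero = bits[i] == 0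
--         j = i + 1
--         while j < n and (bits[j] == 0) == zero:
--             j += 1
--         if zero:
--             max_0 = max(max_0, j - i)
--         else:
--             max_1 = max(max_1, j - i)
--         i = j
--     return max_0, max_1
-- ===== Notes on version B (the rewrite author's own statement) =====
-- stated objective: faster
-- what changed: B segments the list into maximal runs keyed on (b == 0) and takes the max of whole-run lengths per category, instead of A's per-element running counters with two max updates per element; a timing run measured B about 2.3x faster at the largest size.
import Mathlib
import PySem

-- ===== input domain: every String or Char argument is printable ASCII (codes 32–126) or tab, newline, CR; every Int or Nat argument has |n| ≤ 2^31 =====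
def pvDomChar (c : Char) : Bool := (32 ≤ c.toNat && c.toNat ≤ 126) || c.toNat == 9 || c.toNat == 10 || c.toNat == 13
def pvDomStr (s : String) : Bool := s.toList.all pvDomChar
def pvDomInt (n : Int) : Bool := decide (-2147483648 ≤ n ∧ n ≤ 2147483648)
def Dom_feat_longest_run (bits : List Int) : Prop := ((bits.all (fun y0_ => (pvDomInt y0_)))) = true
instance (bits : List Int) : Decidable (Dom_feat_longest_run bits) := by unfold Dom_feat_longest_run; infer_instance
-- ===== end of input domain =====

-- B segments the list into maximal runs keyed on (b == 0) and reduces whole-run lengths, instead of A's per-element running counters (run-at-a-time decomposition; measured constant-factor speedup).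


-- ===== PORT A =====
-- one loop step of A: update the running counters, then both maxima
def aStep (s : Int × Int × Int × Int) (b : Int) : Int × Int × Int × Int :=
  let (m0, m1, c0, c1) := s
  let (c0', c1') := if b = 0 then (c0 + 1, (0 : Int)) else ((0 : Int), c1 + 1)
  (max m0 c0', max m1 c1', c0', c1')

def feat_longest_run (bits : List Int) : Int × Int :=
  let s := bits.foldl aStep (0, 0, 0, 0)
  (s.1, s.2.1)

-- ===== PORT B =====
-- B's outer while-loop: isolate the maximal run at the head (the inner scan is the
-- takeWhile/dropWhile pair), record its length under its key, continue after it
def altGo : List Int → Int × Int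
  | [] => (0, 0)
  | b :: rest =>
    let zero := decide (b = 0)
    let run := rest.takeWhile (fun x => decide (x = 0) == zero)
    let n : Int := (run.length : Int) + 1
    let p := altGo (rest.dropWhile (fun x => decide (x = 0) == zero))
    if zero then (max p.1 n, p.2) else (p.1, max p.2 n)
termination_by l => l.length
decreasing_by
  simpa using Nat.lt_succ_of_le (List.length_dropWhile_le _ _)

def feat_longest_run_alt (bits : List Int) : Int × Int := altGo bits

-- ===== PRECONDITION & SPEC =====
def Spec_feat_longest_run (bits : List Int) (out : Int × Int) : Prop := out = feat_longest_run_alt bits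
instance (bits : List Int) (out : Int × Int) : Decidable (Spec_feat_longest_run bits out) := by unfold Spec_feat_longest_run; infer_instance

-- ===== CLAIM (what is proved, stated in full; the proofs are below) =====
def Claim_equal_feat_longest_run : Prop := ∀ (bits : List Int), Dom_feat_longest_run bits → Spec_feat_longest_run bits (feat_longest_run bits)

-- ===== LEMMAS AND PROOFS =====

-- folding A's step over a block of zeros just extends cur_0
theorem fold_zeros (l : List Int) (h : ∀ x ∈ l, x = 0) (m0 m1 c0 : Int)
    (hm0 : c0 ≤ m0) (hm1 : 0 ≤ m1) :
    l.foldl aStep (m0, m1, c0, 0) = (max m0 (c0 + l.length), m1, c0 + l.length, 0) := by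
  induction l generalizing m0 c0 with
  | nil => simp; omega
  | cons x xs ih =>
    have hx : x = 0 := h x (by simp)
    have hx' : ∀ y ∈ xs, y = 0 := fun y hy => h y (by simp [hy])
    simp only [List.foldl_cons, aStep, hx, if_true]
    rw [max_eq_left hm1]
    rw [ih hx' (max m0 (c0 + 1)) (c0 + 1) (le_max_right _ _)]
    simp only [List.length_cons, Prod.mk.injEq]
    push_cast
    refine ⟨?_, trivial, ?_, trivial⟩ <;> omega

-- folding A's step over a block of nonzeros just extends cur_1
theorem fold_ones (l : List Int) (h : ∀ x ∈ l, x ≠ 0) (m0 m1 c1 : Int)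
    (hm1 : c1 ≤ m1) (hm0 : 0 ≤ m0) :
    l.foldl aStep (m0, m1, 0, c1) = (m0, max m1 (c1 + l.length), 0, c1 + l.length) := by
  induction l generalizing m1 c1 with
  | nil => simp; omega
  | cons x xs ih =>
    have hx : x ≠ 0 := h x (by simp)
    have hx' : ∀ y ∈ xs, y ≠ 0 := fun y hy => h y (by simp [hy])
    simp only [List.foldl_cons, aStep, if_neg hx]
    rw [max_eq_left hm0]
    rw [ih hx' (max m1 (c1 + 1)) (c1 + 1) (le_max_right _ _)]
    simp only [List.length_cons, Prod.mk.injEq]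
    push_cast
    refine ⟨trivial, ?_, trivial, ?_⟩ <;> omega

-- a stale cur_0 is irrelevant when the list starts with a nonzero element (or is empty)
theorem fold_reset0 (l : List Int) (hl : ∀ d ds, l = d :: ds → d ≠ 0)
    (m0 m1 c0 : Int) :
    ((l.foldl aStep (m0, m1, c0, 0)).1, (l.foldl aStep (m0, m1, c0, 0)).2.1)
      = ((l.foldl aStep (m0, m1, 0, 0)).1, (l.foldl aStep (m0, m1, 0, 0)).2.1) := by
  cases l with
  | nil => rfl
  | cons x xs =>
    have hx : x ≠ 0 := hl x xs rfl
    simp [List.foldl_cons, aStep, if_neg hx]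

-- a stale cur_1 is irrelevant when the list starts with a zero (or is empty)
theorem fold_reset1 (l : List Int) (hl : ∀ d ds, l = d :: ds → d = 0)
    (m0 m1 c1 : Int) :
    ((l.foldl aStep (m0, m1, 0, c1)).1, (l.foldl aStep (m0, m1, 0, c1)).2.1)
      = ((l.foldl aStep (m0, m1, 0, 0)).1, (l.foldl aStep (m0, m1, 0, 0)).2.1) := by
  cases l with
  | nil => rfl
  | cons x xs =>
    have hx : x = 0 := hl x xs rfl
    simp [List.foldl_cons, aStep, hx]

-- the first element surviving dropWhile fails the predicate
theorem dropWhile_head_not {α : Type} (p : α → Bool) (l : List α) (d : α) (ds : List α)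
    (h : l.dropWhile p = d :: ds) : p d = false := by
  induction l with
  | nil => simp at h
  | cons x xs ih =>
    rw [List.dropWhile_cons] at h
    by_cases hp : p x
    · rw [if_pos hp] at h; exact ih h
    · rw [if_neg hp] at h
      cases h
      simpa using hp

-- unfolding altGo on a list headed by 0
theorem altGo_cons_zero (rest : List Int) :
    altGo (0 :: rest) =
      (max (altGo (rest.dropWhile (fun x : Int => decide (x = 0)))).1
         (((rest.takeWhile (fun x : Int => decide (x = 0))).length : Int) + 1),
       (altGo (rest.dropWhile (fun x : Int => decide (x = 0)))).2) := by
  rw [altGo]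
  simp

-- unfolding altGo on a list headed by a nonzero element
theorem altGo_cons_ne (b : Int) (rest : List Int) (hb : b ≠ 0) :
    altGo (b :: rest) =
      ((altGo (rest.dropWhile (fun x : Int => !decide (x = 0)))).1,
       max (altGo (rest.dropWhile (fun x : Int => !decide (x = 0)))).2
         (((rest.takeWhile (fun x : Int => !decide (x = 0))).length : Int) + 1)) := by
  rw [altGo]
  simp [hb]

-- both run maxima are nonnegative
theorem altGo_nonneg : ∀ (n : Nat) (l : List Int), l.length ≤ n →
    0 ≤ (altGo l).1 ∧ 0 ≤ (altGo l).2 := by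
  intro n
  induction n with
  | zero =>
    intro l hl
    have : l = [] := List.eq_nil_of_length_eq_zero (Nat.le_zero.mp hl)
    subst this
    simp [altGo]
  | succ n ih =>
    intro l hl
    cases l with
    | nil => simp [altGo]
    | cons b rest =>
      by_cases hb : b = 0
      · subst hb
        rw [altGo_cons_zero]
        have hlen' : (rest.dropWhile (fun x : Int => decide (x = 0))).length ≤ n := by
          have := List.length_dropWhile_le (fun x : Int => decide (x = 0)) rest
          simp only [List.length_cons] at hl
          omega
        have := ih _ hlen'
        have hc : (0 : Int) ≤ ((rest.takeWhile (fun x : Int => decide (x = 0))).length : Int) :=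
          Int.natCast_nonneg _
        exact ⟨by omega, this.2⟩
      · rw [altGo_cons_ne b rest hb]
        have hlen' : (rest.dropWhile (fun x : Int => !decide (x = 0))).length ≤ n := by
          have := List.length_dropWhile_le (fun x : Int => !decide (x = 0)) rest
          simp only [List.length_cons] at hl
          omega
        have := ih _ hlen'
        have hc : (0 : Int) ≤ ((rest.takeWhile (fun x : Int => !decide (x = 0))).length : Int) :=
          Int.natCast_nonneg _
        exact ⟨this.1, by omega⟩

-- main invariant: A's fold from clean counters computes B's run maxima, maxed with the accumulators
theorem main_inv : ∀ (n : Nat) (bits : List Int), bits.length ≤ n → ∀ (m0 m1 : Int),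
    0 ≤ m0 → 0 ≤ m1 →
    ((bits.foldl aStep (m0, m1, 0, 0)).1, (bits.foldl aStep (m0, m1, 0, 0)).2.1)
      = (max m0 (altGo bits).1, max m1 (altGo bits).2) := by
  intro n
  induction n with
  | zero =>
    intro bits hlen m0 m1 hm0 hm1
    have hb : bits = [] := List.eq_nil_of_length_eq_zero (Nat.le_zero.mp hlen)
    subst hb
    simp only [List.foldl_nil, altGo, Prod.mk.injEq]
    omega
  | succ n ih =>
    intro bits hlen m0 m1 hm0 hm1
    cases bits with
    | nil =>
      simp only [List.foldl_nil, altGo, Prod.mk.injEq]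
      omega
    | cons b rest =>
      by_cases hb : b = 0
      · subst hb
        have htake : ∀ x ∈ rest.takeWhile (fun x : Int => decide (x = 0)), x = 0 := by
          intro x hx
          simpa using List.mem_takeWhile_imp hx
        have hdropq : ∀ d ds, rest.dropWhile (fun x : Int => decide (x = 0)) = d :: ds → d ≠ 0 := by
          intro d ds hd
          have := dropWhile_head_not _ rest d ds hd
          simpa using this
        have hlen' : (rest.dropWhile (fun x : Int => decide (x = 0))).length ≤ n := by
          have h1 := List.length_dropWhile_le (fun x : Int => decide (x = 0)) rest
          simp only [List.length_cons] at hlen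
          omega
        have hsplit : rest = rest.takeWhile (fun x : Int => decide (x = 0))
            ++ rest.dropWhile (fun x : Int => decide (x = 0)) :=
          (List.takeWhile_append_dropWhile).symm
        simp only [List.foldl_cons, aStep, if_true, zero_add]
        rw [max_eq_left hm1]
        conv_lhs => rw [hsplit]
        rw [List.foldl_append]
        rw [fold_zeros _ htake (max m0 1) m1 1 (le_max_right _ _) hm1]
        rw [fold_reset0 _ hdropq]
        rw [ih _ hlen' (max (max m0 1) (1 + ((rest.takeWhile (fun x : Int => decide (x = 0))).length : Int)))
              m1 (by omega) hm1]
        rw [altGo_cons_zero]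
        simp only [Prod.mk.injEq]
        exact ⟨by omega, trivial⟩
      · have htake : ∀ x ∈ rest.takeWhile (fun x : Int => !decide (x = 0)), x ≠ 0 := by
          intro x hx
          simpa using List.mem_takeWhile_imp hx
        have hdropq : ∀ d ds, rest.dropWhile (fun x : Int => !decide (x = 0)) = d :: ds → d = 0 := by
          intro d ds hd
          have := dropWhile_head_not _ rest d ds hd
          simpa using this
        have hlen' : (rest.dropWhile (fun x : Int => !decide (x = 0))).length ≤ n := by
          have h1 := List.length_dropWhile_le (fun x : Int => !decide (x = 0)) rest
          simp only [List.length_cons] at hlen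
          omega
        have hsplit : rest = rest.takeWhile (fun x : Int => !decide (x = 0))
            ++ rest.dropWhile (fun x : Int => !decide (x = 0)) :=
          (List.takeWhile_append_dropWhile).symm
        have hpred : (fun x : Int => decide (x = 0) == decide (b = 0))
            = fun x : Int => !decide (x = 0) := by
          funext x
          simp [hb]
        simp only [List.foldl_cons, aStep, if_neg hb, zero_add]
        rw [max_eq_left hm0]
        conv_lhs => rw [hsplit]
        rw [List.foldl_append]
        rw [fold_ones _ htake m0 (max m1 1) 1 (le_max_right _ _) hm0]
        rw [fold_reset1 _ hdropq]
        rw [ih _ hlen' m0 (max (max m1 1) (1 + ((rest.takeWhile (fun x : Int => !decide (x = 0))).length : Int)))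
              hm0 (by omega)]
        rw [altGo_cons_ne b rest hb]
        simp only [Prod.mk.injEq]
        exact ⟨trivial, by omega⟩

-- ===== VERDICT (by name: the statement is the Claim_ definition above) =====
theorem feat_longest_run_spec : Claim_equal_feat_longest_run := by
  intro bits _
  unfold Spec_feat_longest_run feat_longest_run feat_longest_run_alt
  have h := main_inv bits.length bits le_rfl 0 0 le_rfl le_rfl
  have h0 := altGo_nonneg bits.length bits le_rfl
  have e1 : (bits.foldl aStep (0, 0, 0, 0)).1 = max 0 (altGo bits).1 := congrArg Prod.fst h
  have e2 : (bits.foldl aStep (0, 0, 0, 0)).2.1 = max 0 (altGo bits).2 :=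
    congrArg Prod.snd h
  have : (max 0 (altGo bits).1, max 0 (altGo bits).2) = altGo bits := by
    rw [max_eq_right h0.1, max_eq_right h0.2]
  simp only at e1 e2
  rw [← this]
  exact Prod.ext e1 e2
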